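-- pv_equiv track=rewrite | github.com/h000/algorithms | programmers/야근지수.py | solution
-- ===== SOURCE A (Python) =====
-- import heapq
--
-- def solution(n, works):
--     answer = 0
--     works = [-work for work in works]
--     heapq.heapify(works)
--     while works and n > 0:
--         work = -heapq.heappop(works)
--         work -= 1
--         if work > 0:
--             heapq.heappush(works, -work)
--         n -= 1
--     for work in works:
--         answer += work * work
--     return answer
-- ===== SOURCE B (Python) =====
-- # B: water-fill by plateau merging over the run-length-encoded sorted list,
-- # a different algorithm from A's one-unit-per-step heap simulation.
-- def solution(n, works):
--     if n <= 0 or not works: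
--         return sum(w * w for w in works)
--     ws = sorted(works, reverse=True)
--     runs = []
--     for w in ws:
--         if runs and runs[-1][0] == w:
--             runs[-1][1] += 1
--         else:
--             runs.append([w, 1])
--     rem, L, k, i = n, ws[0], 0, 0
--     while L > 1:
--         target = runs[i][0] if i < len(runs) and runs[i][0] > 1 else 1
--         need = k * (L - target)
--         if need > rem:
--             d, r = divmod(rem, k)
--             L -= d
--             return r * (L - 1) ** 2 + (k - r) * L * L + sum(v * v * c for v, c in runs[i:])
--         rem -= need
--         L = target
--         if i < len(runs) and runs[i][0] == target:
--             k += runs[i][1]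
--             i += 1
--     m = k + sum(c for _, c in runs[i:])
--     if rem >= m:
--         return 0
--     ds = [1] * k + [v for v, c in runs[i:] for _ in range(c)]
--     return sum(v * v for v in ds[rem:])
-- ===== Notes on version B (the rewrite author's own statement) =====
-- stated objective: alternative
-- what changed: Replaces the heap simulation that removes one unit of work per loop step by a water-fill: sort descending, run-length encode, merge plateaus level by level with batch arithmetic (k*(L-target) units at once, divmod for the final partial level) and a batch deletion phase for the level<=1 leftovers.
import Mathlib
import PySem

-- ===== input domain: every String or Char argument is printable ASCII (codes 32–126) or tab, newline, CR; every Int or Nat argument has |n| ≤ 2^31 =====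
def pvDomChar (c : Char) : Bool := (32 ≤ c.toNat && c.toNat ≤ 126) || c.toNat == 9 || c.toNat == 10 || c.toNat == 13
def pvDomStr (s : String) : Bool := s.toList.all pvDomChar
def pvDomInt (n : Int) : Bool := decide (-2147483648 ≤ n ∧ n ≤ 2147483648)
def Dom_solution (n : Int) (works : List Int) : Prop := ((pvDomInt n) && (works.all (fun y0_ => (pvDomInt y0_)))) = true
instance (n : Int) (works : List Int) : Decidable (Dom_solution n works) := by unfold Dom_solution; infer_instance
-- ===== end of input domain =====

-- B replaces A's heap simulation (one unit of work removed per loop step) by a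
-- water-fill over the run-length-encoded sorted list: batch plateau merging.

-- ===== PORT A =====
-- heapq is ported as an abstract priority queue on a list: heappop returns the
-- minimum value and removes one occurrence of it, heappush adds the element;
-- this is exact for the values A computes (the heap's internal array order is
-- never observed by A except through pops and an order-insensitive final sum).
def solutionLoop (n : Int) (heap : List Int) : Int :=
  if h : heap ≠ [] ∧ 0 < n then
    match PySem.List.min? heap (fun x => x) with
    | none => 0   -- unreachable: heap ≠ []
    | some m =>
      -- work = -heappop(works); work -= 1
      let work := -m - 1
      let heap' := heap.erase m
      solutionLoop (n - 1) (if 0 < work then (-work) :: heap' else heap')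
  else
    heap.foldl (fun acc w => acc + w * w) 0
termination_by n.toNat
decreasing_by omega

def solution (n : Int) (works : List Int) : Int :=
  solutionLoop n (works.map (fun w => -w))

-- ===== PORT B =====
-- run-length encoding of a (descending-sorted) list: (value, count) pairs
def buildRuns : List Int → List (Int × Int)
  | [] => []
  | w :: t =>
    (w, 1 + ((t.takeWhile (· == w)).length : Int)) :: buildRuns (t.dropWhile (· == w))
termination_by l => l.length
decreasing_by
  exact Nat.lt_succ_of_le (List.length_dropWhile_le _ _)

-- the while-loop of Source B: state (rem, L, k, runs-suffix)
def solGo (rem L k : Int) (runs : List (Int × Int)) : Int :=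
  if hL : 1 < L then
    match runs with
    | (v, c) :: rest =>
      if k * (L - (if 1 < v then v else 1)) > rem then
        -- d, r = divmod(rem, k)  (k ≠ 0 whenever this branch is reached)
        ((PySem.Int.divmod? rem k).getD (0, 0)).2
            * ((L - ((PySem.Int.divmod? rem k).getD (0, 0)).1 - 1)) ^ 2
          + (k - ((PySem.Int.divmod? rem k).getD (0, 0)).2)
            * (L - ((PySem.Int.divmod? rem k).getD (0, 0)).1)
            * (L - ((PySem.Int.divmod? rem k).getD (0, 0)).1)
          + (((v, c) :: rest).map (fun p => p.1 * p.1 * p.2)).sum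
      else
        if hv : v = (if 1 < v then v else 1) then
          solGo (rem - k * (L - (if 1 < v then v else 1))) (if 1 < v then v else 1) (k + c) rest
        else
          solGo (rem - k * (L - (if 1 < v then v else 1))) (if 1 < v then v else 1) k ((v, c) :: rest)
    | [] =>
      if k * (L - 1) > rem then
        ((PySem.Int.divmod? rem k).getD (0, 0)).2
            * ((L - ((PySem.Int.divmod? rem k).getD (0, 0)).1 - 1)) ^ 2
          + (k - ((PySem.Int.divmod? rem k).getD (0, 0)).2)
            * (L - ((PySem.Int.divmod? rem k).getD (0, 0)).1)
            * (L - ((PySem.Int.divmod? rem k).getD (0, 0)).1)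
      else
        solGo (rem - k * (L - 1)) 1 k []
  else
    if rem ≥ k + (runs.map (fun p => p.2)).sum then 0
    else
      ((PySem.List.slice
          (List.replicate k.toNat (1 : Int) ++
            runs.flatMap (fun p => List.replicate p.2.toNat p.1))
          (some rem) none).map (fun v => v * v)).sum
termination_by runs.length * 2 + (if 1 < L then 1 else 0)
decreasing_by
  · simp only [List.length_cons]
    split <;> norm_num
  · have h1 : ¬ 1 < v := fun hgt => hv (by simp [hgt])
    simp only [List.length_cons, dif_neg h1, if_pos hL]
    norm_num
  · simp only [if_pos hL]
    split <;> omega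

def solution_alt (n : Int) (works : List Int) : Int :=
  if n ≤ 0 ∨ works = [] then
    (works.map (fun w => w * w)).sum
  else
    match PySem.List.sorted works (fun x => x) true with
    | w0 :: _ => solGo n w0 0 (buildRuns (PySem.List.sorted works (fun x => x) true))
    | [] => 0   -- unreachable: works ≠ []

-- ===== PRECONDITION & SPEC =====
def Spec_solution (n : Int) (works : List Int) (out : Int) : Prop := out = solution_alt n works
instance (n : Int) (works : List Int) (out : Int) : Decidable (Spec_solution n works out) := by unfold Spec_solution; infer_instance

-- ===== CLAIM (what is proved, stated in full; the proofs are below) =====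
def Claim_equal_solution : Prop := ∀ (n : Int) (works : List Int), Dom_solution n works → Spec_solution n works (solution n works)

-- ===== LEMMAS AND PROOFS =====

-- sum of squares
def sumsq (l : List Int) : Int := (l.map (fun w => w * w)).sum

-- descending insertion (before the first element ≤ a)
def insDesc (a : Int) : List Int → List Int
  | [] => [a]
  | b :: l => if a < b then b :: insDesc a l else a :: b :: l

-- the greedy of A, on a descending-sorted list, with Nat fuel
def msG : Nat → List Int → Int
  | 0, l => sumsq l
  | _ + 1, [] => 0
  | f + 1, v :: rest => if 1 < v then msG f (insDesc (v - 1) rest) else msG f rest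

-- expansion of a run-length encoding
def expand (runs : List (Int × Int)) : List Int :=
  runs.flatMap (fun p => List.replicate p.2.toNat p.1)

-- descending-sortedness
def sortedD (l : List Int) : Prop := l.Pairwise (fun a b => b ≤ a)

theorem sumsq_cons (a : Int) (l : List Int) : sumsq (a :: l) = a * a + sumsq l := by
  simp [sumsq]

theorem sumsq_append (l1 l2 : List Int) : sumsq (l1 ++ l2) = sumsq l1 + sumsq l2 := by
  simp [sumsq]

theorem sumsq_replicate (n : Nat) (x : Int) :
    sumsq (List.replicate n x) = (n : Int) * (x * x) := by
  induction n with
  | zero => simp [sumsq]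
  | succ n ih => rw [List.replicate_succ, sumsq_cons, ih]; push_cast; ring

theorem sumsq_perm {l l' : List Int} (h : l.Perm l') : sumsq l = sumsq l' := by
  unfold sumsq; exact (h.map _).sum_eq

theorem sumsq_neg (l : List Int) : sumsq (l.map (fun w => -w)) = sumsq l := by
  simp [sumsq, Function.comp_def]

theorem foldl_sumsq (l : List Int) (s : Int) :
    l.foldl (fun acc w => acc + w * w) s = s + sumsq l := by
  induction l generalizing s with
  | nil => simp [sumsq]
  | cons a t ih => simp only [List.foldl_cons, ih, sumsq_cons]; ring

theorem insDesc_perm (a : Int) (l : List Int) : (insDesc a l).Perm (a :: l) := by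
  induction l with
  | nil => simp [insDesc]
  | cons b t ih =>
    unfold insDesc
    split
    · exact (ih.cons b).trans (List.Perm.swap a b t)
    · exact List.Perm.refl _

theorem mem_insDesc {x a : Int} {l : List Int} (h : x ∈ insDesc a l) : x = a ∨ x ∈ l := by
  have := (insDesc_perm a l).mem_iff.mp h
  simpa using this

theorem insDesc_sortedD (a : Int) (l : List Int) (h : sortedD l) :
    sortedD (insDesc a l) := by
  induction l with
  | nil => simp [insDesc, sortedD]
  | cons b t ih =>
    unfold insDesc
    split
    · rename_i hab
      have hb := (List.pairwise_cons.mp h).1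
      have ht := (List.pairwise_cons.mp h).2
      refine List.pairwise_cons.mpr ⟨?_, ih ht⟩
      intro x hx
      rcases mem_insDesc hx with rfl | hx
      · exact le_of_lt hab
      · exact hb x hx
    · rename_i hab
      have hab : b ≤ a := not_lt.mp hab
      have hb := (List.pairwise_cons.mp h).1
      refine List.pairwise_cons.mpr ⟨?_, h⟩
      intro x hx
      rcases List.mem_cons.mp hx with rfl | hx
      · exact hab
      · exact le_trans (hb x hx) hab

theorem insDesc_shape (a : Int) (l1 l2 : List Int)
    (h1 : ∀ x ∈ l1, a < x) (h2 : ∀ y, l2.head? = some y → y ≤ a) :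
    insDesc a (l1 ++ l2) = l1 ++ a :: l2 := by
  induction l1 with
  | nil =>
    cases l2 with
    | nil => rfl
    | cons y t =>
      have : ¬ a < y := not_lt.mpr (h2 y rfl)
      simp [insDesc, this]
  | cons b t ih =>
    have hb : a < b := h1 b (List.mem_cons_self)
    simp [insDesc, hb, ih (fun x hx => h1 x (List.mem_cons_of_mem b hx))]

theorem solutionLoop_eq_msG : ∀ (f : Nat) (n : Int) (heap ds : List Int),
    n.toNat = f → heap.Perm (ds.map (fun x => -x)) → sortedD ds →
    solutionLoop n heap = msG f ds := by
  intro f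
  induction f with
  | zero =>
    intro n heap ds hf hperm hsort
    have hn : n ≤ 0 := by omega
    rw [solutionLoop, dif_neg (by simp [not_lt.mpr hn])]
    rw [foldl_sumsq, sumsq_perm hperm, sumsq_neg]
    simp [msG, sumsq]
  | succ f ih =>
    intro n heap ds hf hperm hsort
    have hn : 0 < n := by omega
    rw [solutionLoop]
    by_cases hne : heap = []
    · rw [dif_neg (by simp [hne])]
      have : ds = [] := by
        subst hne
        have := hperm.symm.eq_nil
        simpa using this
      subst this
      simp [hne, msG]
    · rw [dif_pos ⟨hne, hn⟩]
      -- ds is nonempty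
      obtain ⟨d, t, rfl⟩ : ∃ d t, ds = d :: t := by
        cases ds with
        | nil => exact absurd (by simpa using hperm) hne
        | cons d t => exact ⟨d, t, rfl⟩
      have hd_le : ∀ x ∈ d :: t, x ≤ d := by
        intro x hx
        rcases List.mem_cons.mp hx with rfl | hx
        · exact le_refl x
        · exact (List.pairwise_cons.mp hsort).1 x hx
      -- the popped minimum is -d
      obtain ⟨m, hm⟩ : ∃ m, PySem.List.min? heap (fun x => x) = some m := by
        cases hmin : PySem.List.min? heap (fun x => x) with
        | none => exact absurd ((PySem.List.min?_eq_none_iff heap (fun x => x)).mp hmin) hne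
        | some m => exact ⟨m, rfl⟩
      have hmmem : m ∈ heap := PySem.List.min?_mem hm
      have hmeq : m = -d := by
        have h1 : m ≤ -d := PySem.List.min?_isMin hm (-d)
          (hperm.mem_iff.mpr (by simp))
        have h2 : -d ≤ m := by
          have := hperm.mem_iff.mp hmmem
          obtain ⟨x, hx, hxm⟩ := List.mem_map.mp this
          have := hd_le x hx
          omega
        omega
      subst hmeq
      rw [hm]
      -- erasing the minimum leaves a permutation of map neg t
      have herase : (heap.erase (-d)).Perm (t.map (fun x => -x)) := by
        have h1 : heap.Perm ((-d) :: t.map (fun x => -x)) := by simpa using hperm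
        have h2 := h1.erase (-d)
        simpa using h2
      have htsort : sortedD t := (List.pairwise_cons.mp hsort).2
      rw [msG]
      show solutionLoop (n - 1)
          (if 0 < - -d - 1 then -(- -d - 1) :: heap.erase (-d) else heap.erase (-d)) = _
      by_cases hgt : 1 < d
      · rw [if_pos (show (0:Int) < - -d - 1 by omega), if_pos hgt]
        apply ih (n - 1) _ _ (by omega) _ (insDesc_sortedD _ _ htsort)
        have he : -(- -d - 1) = -(d - 1) := by ring
        rw [he]
        have hp1 : ((-(d-1)) :: heap.erase (-d)).Perm
            (((d-1) :: t).map (fun x => -x)) := by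
          simpa using herase.cons (-(d-1))
        exact hp1.trans ((insDesc_perm (d-1) t).map _).symm
      · rw [if_neg (show ¬ (0:Int) < - -d - 1 by omega), if_neg hgt]
        exact ih (n - 1) _ _ (by omega) herase htsort

theorem msG_step (f : Nat) (L : Int) (k1 k2 : Nat) (rest : List Int)
    (hL : 2 ≤ L) (hr : ∀ y, rest.head? = some y → y ≤ L - 1) :
    msG (f + 1) (List.replicate (k1 + 1) L ++ (List.replicate k2 (L - 1) ++ rest))
      = msG f (List.replicate k1 L ++ (List.replicate (k2 + 1) (L - 1) ++ rest)) := by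
  have hcons : List.replicate (k1 + 1) L ++ (List.replicate k2 (L - 1) ++ rest)
      = L :: (List.replicate k1 L ++ (List.replicate k2 (L - 1) ++ rest)) := by
    simp [List.replicate_succ]
  rw [hcons, msG, if_pos (show (1:Int) < L by omega)]
  congr 1
  rw [insDesc_shape (L - 1) (List.replicate k1 L) (List.replicate k2 (L - 1) ++ rest)
    (by intro x hx; rw [List.eq_of_mem_replicate hx]; omega)
    (by
      intro y hy
      cases k2 with
      | zero => exact hr y (by simpa using hy)
      | succ k2 => simp [List.replicate_succ] at hy; omega)]
  simp [List.replicate_succ]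

theorem msG_level (L : Int) (hL : 2 ≤ L) : ∀ (k1 f k2 : Nat) (rest : List Int),
    (∀ y, rest.head? = some y → y ≤ L - 1) →
    msG (f + k1) (List.replicate k1 L ++ (List.replicate k2 (L - 1) ++ rest))
      = msG f (List.replicate (k1 + k2) (L - 1) ++ rest) := by
  intro k1
  induction k1 with
  | zero => intro f k2 rest hr; simp
  | succ k1 ih =>
    intro f k2 rest hr
    have h1 : f + (k1 + 1) = (f + k1) + 1 := by omega
    rw [h1, msG_step (f + k1) L k1 k2 rest hL hr,
      show (k1 + 1) + k2 = k1 + (k2 + 1) by omega]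
    exact ih f (k2 + 1) rest hr

theorem msG_jump : ∀ (j : Nat) (f k : Nat) (L : Int) (rest : List Int),
    (j : Int) ≤ L - 1 → (∀ y, rest.head? = some y → y ≤ L - j) →
    msG (f + k * j) (List.replicate k L ++ rest)
      = msG f (List.replicate k (L - j) ++ rest) := by
  intro j
  induction j with
  | zero => intro f k L rest _ _; simp
  | succ j ih =>
    intro f k L rest hj hr
    have hcast : ((j + 1 : Nat) : Int) = (j : Int) + 1 := by push_cast; ring
    rw [hcast] at hj hr
    have hL2 : 2 ≤ L := by omega
    have h1 : f + k * (j + 1) = (f + k * j) + k := by ring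
    rw [h1]
    have hlvl := msG_level L hL2 k (f + k * j) 0 rest
      (by intro y hy; have := hr y hy; omega)
    simp only [List.replicate, List.nil_append, Nat.add_zero] at hlvl
    rw [hcast, show L - ((j : Int) + 1) = (L - 1) - (j : Int) by ring]
    exact hlvl.trans (ih f k (L - 1) rest (by omega)
      (by intro y hy; have := hr y hy; omega))

theorem msG_partial : ∀ (r k k2 : Nat) (L : Int) (rest : List Int),
    r ≤ k → 2 ≤ L → (∀ y, rest.head? = some y → y ≤ L - 1) →
    msG r (List.replicate k L ++ (List.replicate k2 (L - 1) ++ rest))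
      = sumsq (List.replicate (k - r) L ++ (List.replicate (k2 + r) (L - 1) ++ rest)) := by
  intro r
  induction r with
  | zero => intro k k2 L rest _ _ _; simp [msG]
  | succ r ih =>
    intro k k2 L rest hrk hL hr
    obtain ⟨k', rfl⟩ : ∃ k', k = k' + 1 := ⟨k - 1, by omega⟩
    rw [msG_step r L k' k2 rest hL hr, ih k' (k2 + 1) L rest (by omega) hL hr,
      show k' + 1 - (r + 1) = k' - r by omega, show k2 + 1 + r = k2 + (r + 1) by omega]

theorem msG_del : ∀ (f : Nat) (l : List Int), (∀ x ∈ l, x ≤ 1) →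
    msG f l = sumsq (l.drop f) := by
  intro f
  induction f with
  | zero => intro l _; simp [msG]
  | succ f ih =>
    intro l hle
    cases l with
    | nil => simp [msG, sumsq]
    | cons v t =>
      have hv : ¬ 1 < v := not_lt.mpr (hle v (List.mem_cons_self))
      rw [msG, if_neg hv, List.drop_succ_cons]
      exact ih t (fun x hx => hle x (List.mem_cons_of_mem v hx))

theorem mem_expand {x : Int} {runs : List (Int × Int)} (h : x ∈ expand runs) :
    ∃ p ∈ runs, x = p.1 := by
  unfold expand at h
  obtain ⟨p, hp, hx⟩ := List.mem_flatMap.mp h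
  exact ⟨p, hp, List.eq_of_mem_replicate hx⟩

theorem expand_cons (v c : Int) (rest : List (Int × Int)) :
    expand ((v, c) :: rest) = List.replicate c.toNat v ++ expand rest := by
  simp [expand]

theorem head_expand {v c : Int} (rest : List (Int × Int)) (hc : 1 ≤ c) :
    (expand ((v, c) :: rest)).head? = some v := by
  rw [expand_cons]
  obtain ⟨c', hc'⟩ : ∃ c', c.toNat = c' + 1 := ⟨c.toNat - 1, by omega⟩
  rw [hc', List.replicate_succ]
  simp

theorem expand_length (runs : List (Int × Int)) (hc : ∀ p ∈ runs, 0 ≤ p.2) :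
    ((expand runs).length : Int) = (runs.map (fun p => p.2)).sum := by
  induction runs with
  | nil => simp [expand]
  | cons p rest ih =>
    cases p with
    | mk v c =>
      rw [expand_cons]
      have h1 := hc (v, c) (List.mem_cons_self)
      have := ih (fun q hq => hc q (List.mem_cons_of_mem _ hq))
      simp only [List.length_append, List.length_replicate, List.map_cons, List.sum_cons]
      push_cast
      omega

theorem sumsq_expand (runs : List (Int × Int)) (hc : ∀ p ∈ runs, 0 ≤ p.2) :
    sumsq (expand runs) = (runs.map (fun p => p.1 * p.1 * p.2)).sum := by
  induction runs with
  | nil => simp [expand, sumsq]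
  | cons p rest ih =>
    cases p with
    | mk v c =>
      rw [expand_cons, sumsq_append, sumsq_replicate,
        ih (fun q hq => hc q (List.mem_cons_of_mem _ hq))]
      have h1 := hc (v, c) (List.mem_cons_self)
      simp only [List.map_cons, List.sum_cons]
      rw [Int.toNat_of_nonneg h1]
      ring

theorem cnt_sum_nonneg (runs : List (Int × Int)) (hc : ∀ p ∈ runs, 0 ≤ p.2) :
    0 ≤ (runs.map (fun p => p.2)).sum := by
  induction runs with
  | nil => simp
  | cons p rest ih =>
    simp only [List.map_cons, List.sum_cons]
    have := hc p (List.mem_cons_self)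
    have := ih (fun q hq => hc q (List.mem_cons_of_mem _ hq))
    omega

theorem takeWhile_eq_replicate (w : Int) (t : List Int) :
    t.takeWhile (· == w) = List.replicate (t.takeWhile (· == w)).length w := by
  apply List.eq_replicate_of_mem
  intro x hx
  exact (by simpa using (List.mem_takeWhile_imp hx) : x = w)

theorem buildRuns_expand : ∀ l : List Int, expand (buildRuns l) = l := by
  intro l
  induction l using buildRuns.induct with
  | case1 => simp [buildRuns, expand]
  | case2 w t ih =>
    rw [buildRuns, expand_cons, ih]
    rw [show (1 + ((t.takeWhile (· == w)).length : Int)).toNat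
        = (t.takeWhile (· == w)).length + 1 by omega]
    rw [List.replicate_succ]
    rw [← takeWhile_eq_replicate]
    simp [List.takeWhile_append_dropWhile]

theorem buildRuns_val_mem : ∀ (l : List Int) (p : Int × Int), p ∈ buildRuns l → p.1 ∈ l := by
  intro l
  induction l using buildRuns.induct with
  | case1 => simp [buildRuns]
  | case2 w t ih =>
    intro p hp
    rw [buildRuns] at hp
    rcases List.mem_cons.mp hp with rfl | hp
    · exact List.mem_cons_self
    · exact List.mem_cons_of_mem w ((t.dropWhile_sublist (· == w)).mem (ih p hp))

theorem buildRuns_cnt_pos : ∀ (l : List Int) (p : Int × Int), p ∈ buildRuns l → 1 ≤ p.2 := by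
  intro l
  induction l using buildRuns.induct with
  | case1 => simp [buildRuns]
  | case2 w t ih =>
    intro p hp
    rw [buildRuns] at hp
    rcases List.mem_cons.mp hp with rfl | hp
    · simp
    · exact ih p hp

theorem mem_dropWhile_lt (w : Int) : ∀ (t : List Int), (∀ x ∈ t, x ≤ w) → sortedD t →
    ∀ x ∈ t.dropWhile (· == w), x < w := by
  intro t
  induction t with
  | nil => simp
  | cons b t' ih =>
    intro hle hsort x hx
    by_cases hb : b = w
    · rw [List.dropWhile_cons_of_pos (by simp [hb])] at hx
      exact ih (fun y hy => hle y (List.mem_cons_of_mem b hy))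
        ((List.pairwise_cons.mp hsort).2) x hx
    · rw [List.dropWhile_cons_of_neg (by simp [hb])] at hx
      have hbw : b < w := lt_of_le_of_ne (hle b List.mem_cons_self) hb
      rcases List.mem_cons.mp hx with rfl | hx
      · exact hbw
      · exact lt_of_le_of_lt ((List.pairwise_cons.mp hsort).1 x hx) hbw

theorem sortedD_dropWhile (w : Int) (t : List Int) (h : sortedD t) :
    sortedD (t.dropWhile (· == w)) :=
  h.sublist (t.dropWhile_sublist (· == w))

theorem sortedD_head_le {w : Int} {t : List Int} (h : sortedD (w :: t)) :
    ∀ x ∈ w :: t, x ≤ w := by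
  intro x hx
  rcases List.mem_cons.mp hx with rfl | hx
  · exact le_refl x
  · exact (List.pairwise_cons.mp h).1 x hx

theorem buildRuns_pairwise : ∀ l : List Int, sortedD l →
    (buildRuns l).Pairwise (fun a b => b.1 < a.1) := by
  intro l
  induction l using buildRuns.induct with
  | case1 => simp [buildRuns]
  | case2 w t ih =>
    intro hsort
    rw [buildRuns]
    refine List.pairwise_cons.mpr ⟨?_, ih (sortedD_dropWhile w t (List.pairwise_cons.mp hsort).2)⟩
    intro p hp
    exact mem_dropWhile_lt w t (fun x hx => (List.pairwise_cons.mp hsort).1 x hx)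
      ((List.pairwise_cons.mp hsort).2) p.1 (buildRuns_val_mem _ p hp)

theorem msG_jumpI (rem k d L : Int) (rest : List Int)
    (hk : 0 ≤ k) (hd : 0 ≤ d) (hrem0 : 0 ≤ rem - k * d) (hdL : d ≤ L - 1)
    (hr : ∀ y, rest.head? = some y → y ≤ L - d) :
    msG rem.toNat (List.replicate k.toNat L ++ rest)
      = msG (rem - k * d).toNat (List.replicate k.toNat (L - d) ++ rest) := by
  have hcast : ((k.toNat * d.toNat : Nat) : Int) = k * d := by
    push_cast; rw [Int.toNat_of_nonneg hk, Int.toNat_of_nonneg hd]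
  have hfuel : rem.toNat = (rem - k * d).toNat + k.toNat * d.toNat := by omega
  rw [hfuel]
  have hjump := msG_jump d.toNat (rem - k * d).toNat k.toNat L rest
    (by rw [Int.toNat_of_nonneg hd]; omega)
    (by intro y hy; rw [Int.toNat_of_nonneg hd]; exact hr y hy)
  rw [hjump, Int.toNat_of_nonneg hd]

theorem msG_partialI (r k L : Int) (rest : List Int)
    (h0 : 0 ≤ r) (hrk : r ≤ k) (hL : 2 ≤ L)
    (hr : ∀ y, rest.head? = some y → y ≤ L - 1) :
    msG r.toNat (List.replicate k.toNat L ++ rest)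
      = (k - r) * (L * L) + r * ((L - 1) * (L - 1)) + sumsq rest := by
  have hp := msG_partial r.toNat k.toNat 0 L rest (by omega) hL hr
  simp only [List.replicate_zero, List.nil_append, Nat.zero_add] at hp
  rw [hp, sumsq_append, sumsq_append, sumsq_replicate, sumsq_replicate]
  rw [show ((k.toNat - r.toNat : Nat) : Int) = k - r by omega,
    show ((r.toNat : Nat) : Int) = r by omega]
  ring

theorem solGo_phase2 (rem L k : Int) (runs : List (Int × Int))
    (hL : ¬ 1 < L) (hrem : 0 ≤ rem) (hk : 0 ≤ k)
    (hcnt : ∀ p ∈ runs, 1 ≤ p.2) (hval : ∀ p ∈ runs, p.1 ≤ L)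
    (hk1 : 0 < k → 1 ≤ L) :
    solGo rem L k runs = msG rem.toNat (List.replicate k.toNat L ++ expand runs) := by
  rw [solGo.eq_def, dif_neg hL]
  have hall : ∀ x ∈ List.replicate k.toNat L ++ expand runs, x ≤ 1 := by
    intro x hx
    rcases List.mem_append.mp hx with hx | hx
    · rw [List.eq_of_mem_replicate hx]; omega
    · obtain ⟨p, hp, rfl⟩ := mem_expand hx
      have := hval p hp; omega
  rw [msG_del _ _ hall]
  have hsum := cnt_sum_nonneg runs (fun p hp => le_trans (by norm_num) (hcnt p hp))
  have hlen : ((List.replicate k.toNat L ++ expand runs).length : Int)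
      = k + (runs.map (fun p => p.2)).sum := by
    rw [List.length_append, List.length_replicate]
    push_cast
    rw [expand_length runs (fun p hp => le_trans (by norm_num) (hcnt p hp))]
    omega
  by_cases hge : rem ≥ k + (runs.map (fun p => p.2)).sum
  · rw [if_pos hge, List.drop_eq_nil_of_le (by omega)]
    simp [sumsq]
  · rw [if_neg hge]
    have hrepl : List.replicate k.toNat L = List.replicate k.toNat (1 : Int) := by
      rcases eq_or_lt_of_le hk with h0 | h0
      · rw [show k.toNat = 0 by omega]; rfl
      · rw [le_antisymm (not_lt.mp hL) (hk1 h0)]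
    rw [hrepl, PySem.List.slice_from _ hrem]
    rfl

theorem divmod_getD (rem k : Int) (hk : 0 < k) :
    (PySem.Int.divmod? rem k).getD (0, 0)
      = (PySem.Int.floordiv rem k, PySem.Int.mod rem k) := by
  simp [PySem.Int.divmod?, PySem.Int.floordiv, PySem.Int.mod, show k ≠ 0 by omega]

theorem div_facts (rem k : Int) (hk : 0 < k) (hrem : 0 ≤ rem) :
    k * PySem.Int.floordiv rem k + PySem.Int.mod rem k = rem ∧
    0 ≤ PySem.Int.mod rem k ∧ PySem.Int.mod rem k < k ∧
    0 ≤ PySem.Int.floordiv rem k := by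
  have h1 := PySem.Int.floordiv_mul_add_mod rem k
  have h2 : PySem.Int.mod rem k = rem % k := PySem.Int.mod_eq_emod_of_pos hk
  have h3 : PySem.Int.floordiv rem k = rem / k := PySem.Int.floordiv_eq_ediv_of_pos hk
  refine ⟨by linear_combination h1, ?_, ?_, ?_⟩
  · rw [h2]; exact Int.emod_nonneg rem (by omega)
  · rw [h2]; exact Int.emod_lt_of_pos rem hk
  · rw [h3]; exact Int.ediv_nonneg hrem (by omega)

theorem solGo_eq : ∀ (μ : Nat) (runs : List (Int × Int)) (rem L k : Int),
    runs.length * 2 + (if 1 < L then 1 else 0) ≤ μ →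
    0 ≤ rem → 0 ≤ k →
    runs.Pairwise (fun a b => b.1 < a.1) →
    (∀ p ∈ runs, 1 ≤ p.2) →
    (∀ p ∈ runs, p.1 ≤ L) →
    (0 < k → 1 ≤ L ∧ ∀ p ∈ runs, p.1 < L) →
    solGo rem L k runs = msG rem.toNat (List.replicate k.toNat L ++ expand runs) := by
  intro μ
  induction μ with
  | zero =>
    intro runs rem L k hμ hrem hk hpw hcnt hval h6
    by_cases hL : 1 < L
    · rw [if_pos hL] at hμ; omega
    · exact solGo_phase2 rem L k runs hL hrem hk hcnt hval (fun hk0 => (h6 hk0).1)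
  | succ μ ih =>
    intro runs rem L k hμ hrem hk hpw hcnt hval h6
    by_cases hL : 1 < L
    case neg => exact solGo_phase2 rem L k runs hL hrem hk hcnt hval (fun hk0 => (h6 hk0).1)
    case pos =>
    rw [if_pos hL] at hμ
    rw [solGo.eq_def, dif_pos hL]
    cases runs with
    | nil =>
      have hexp : expand ([] : List (Int × Int)) = [] := rfl
      by_cases hgt : k * (L - 1) > rem
      · rw [if_pos hgt]
        have hk0 : 0 < k := by
          by_contra h
          have := mul_nonpos_of_nonpos_of_nonneg (show k ≤ 0 by omega) (show (0:Int) ≤ L - 1 by omega)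
          omega
        obtain ⟨hdr, hr0, hrk, hd0⟩ := div_facts rem k hk0 hrem
        set d := PySem.Int.floordiv rem k with hdd
        set r := PySem.Int.mod rem k with hrr
        rw [divmod_getD rem k hk0]
        have hdlt : d < L - 1 := by
          by_contra h
          have h1 : k * (L - 1) ≤ k * d := mul_le_mul_of_nonneg_left (by omega) (le_of_lt hk0)
          omega
        rw [hexp]
        rw [msG_jumpI rem k d L [] hk hd0 (by omega) (by omega)
          (by intro y hy; simp at hy)]
        rw [show rem - k * d = r by omega]
        rw [msG_partialI r k (L - d) [] hr0 (by omega) (by omega)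
          (by intro y hy; simp at hy)]
        simp [sumsq]
        ring
      · rw [if_neg hgt]
        have hrem' : 0 ≤ rem - k * (L - 1) := by omega
        rw [ih [] (rem - k * (L - 1)) 1 k (by simp) hrem' hk (by simp) (by simp)
          (by simp) (by intro _; exact ⟨le_refl 1, by simp⟩)]
        rw [hexp]
        rw [msG_jumpI rem k (L - 1) L [] hk (by omega) (by omega) (by omega)
          (by intro y hy; simp at hy)]
        rw [show L - (L - 1) = (1:Int) by ring]
    | cons pr rest =>
      obtain ⟨v, c⟩ := pr
      dsimp only
      have hc1 : 1 ≤ c := hcnt (v, c) List.mem_cons_self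
      have hvL : v ≤ L := hval (v, c) List.mem_cons_self
      have hT1 : 1 ≤ (if 1 < v then v else 1) := by split <;> omega
      have hTle : (if 1 < v then v else 1) ≤ L := by split <;> omega
      have hvT : v ≤ (if 1 < v then v else 1) := by split <;> omega
      have hrest_lt : ∀ p ∈ rest, p.1 < v := fun p hp => (List.pairwise_cons.mp hpw).1 p hp
      have hhead : (expand ((v, c) :: rest)).head? = some v := head_expand rest hc1
      set T := (if 1 < v then v else 1) with hTT
      by_cases hgt : k * (L - T) > rem
      · rw [if_pos hgt]
        have hTL : T < L := by
          by_contra h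
          have := mul_nonpos_of_nonneg_of_nonpos hk (show L - T ≤ 0 by omega)
          omega
        have hk0 : 0 < k := by
          by_contra h
          have := mul_nonpos_of_nonpos_of_nonneg (show k ≤ 0 by omega) (show (0:Int) ≤ L - T by omega)
          omega
        obtain ⟨hdr, hr0, hrk, hd0⟩ := div_facts rem k hk0 hrem
        set d := PySem.Int.floordiv rem k with hdd
        set r := PySem.Int.mod rem k with hrr
        rw [divmod_getD rem k hk0]
        have hdlt : d < L - T := by
          by_contra h
          have h1 : k * (L - T) ≤ k * d := mul_le_mul_of_nonneg_left (by omega) (le_of_lt hk0)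
          omega
        rw [msG_jumpI rem k d L (expand ((v, c) :: rest)) hk hd0 (by omega) (by omega)
          (by intro y hy; rw [hhead] at hy; injection hy with h; omega)]
        rw [show rem - k * d = r by omega]
        rw [msG_partialI r k (L - d) (expand ((v, c) :: rest)) hr0 (by omega) (by omega)
          (by intro y hy; rw [hhead] at hy; injection hy with h; omega)]
        rw [sumsq_expand _ (fun p hp => le_trans (by norm_num) (hcnt p hp))]
        dsimp only
        ring
      · rw [if_neg hgt]
        have hrem' : 0 ≤ rem - k * (L - T) := by omega
        by_cases hv : v = T
        · rw [dif_pos hv]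
          rw [ih rest (rem - k * (L - T)) T (k + c)
            (by simp only [List.length_cons] at hμ; split <;> omega)
            hrem' (by omega) (List.pairwise_cons.mp hpw).2
            (fun p hp => hcnt p (List.mem_cons_of_mem _ hp))
            (fun p hp => le_of_lt (lt_of_lt_of_le (hrest_lt p hp) hvT))
            (fun _ => ⟨hT1, fun p hp => lt_of_lt_of_le (hrest_lt p hp) (le_of_eq hv)⟩)]
          rw [msG_jumpI rem k (L - T) L (expand ((v, c) :: rest)) hk (by omega) (by omega) (by omega)
            (by intro y hy; rw [hhead] at hy; injection hy with h; omega)]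
          rw [show L - (L - T) = T by ring]
          congr 1
          rw [expand_cons, show (k + c).toNat = k.toNat + c.toNat by omega,
            List.replicate_add, List.append_assoc, hv]
        · rw [dif_neg hv]
          have hv1 : ¬ 1 < v := by
            intro h
            exact hv (by rw [hTT, if_pos h])
          have hvlt : v < 1 := by
            have hne : v ≠ 1 := by
              intro h
              exact hv (by rw [hTT, if_neg hv1, h])
            omega
          have hTeq : T = 1 := by rw [hTT, if_neg hv1]
          rw [hTeq] at hrem' ⊢
          rw [ih ((v, c) :: rest) (rem - k * (L - 1)) 1 k
            (by simp only [List.length_cons] at hμ ⊢; norm_num; omega)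
            hrem' hk hpw hcnt
            (by
              intro p hp
              rcases List.mem_cons.mp hp with rfl | hp
              · omega
              · exact le_of_lt (lt_trans (hrest_lt p hp) hvlt))
            (by
              intro _
              refine ⟨le_refl 1, ?_⟩
              intro p hp
              rcases List.mem_cons.mp hp with rfl | hp
              · omega
              · exact lt_trans (hrest_lt p hp) hvlt)]
          rw [msG_jumpI rem k (L - 1) L (expand ((v, c) :: rest)) hk (by omega) (by omega) (by omega)
            (by intro y hy; rw [hhead] at hy; injection hy with h; omega)]
          rw [show L - (L - 1) = (1:Int) by ring]

theorem solution_eq_msG (n : Int) (works : List Int) :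
    solution n works = msG n.toNat (PySem.List.sorted works (fun x => x) true) := by
  apply solutionLoop_eq_msG n.toNat n _ _ rfl
  · exact ((PySem.List.sorted_perm works (fun x => x) true).map _).symm
  · simpa [sortedD] using PySem.List.sorted_pairwise_rev works (fun x => x)

theorem solution_spec : Claim_equal_solution := by
  intro n works _
  unfold Spec_solution solution_alt
  by_cases h : n ≤ 0 ∨ works = []
  · rw [if_pos h]
    rw [solution_eq_msG]
    rcases h with h | h
    · rw [show n.toNat = 0 by omega]
      show sumsq _ = _
      rw [sumsq_perm (PySem.List.sorted_perm works (fun x => x) true)]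
      rfl
    · subst h
      rw [(PySem.List.sorted_eq_nil_iff ([] : List Int) (fun x => x) true).mpr rfl]
      cases hn : n.toNat <;> simp [msG, sumsq]
  · rw [if_neg h]
    have hn0 : 0 < n := by
      rcases not_or.mp h with ⟨h1, _⟩; omega
    have hwne : works ≠ [] := (not_or.mp h).2
    obtain ⟨w0, t, hws⟩ : ∃ w0 t, PySem.List.sorted works (fun x => x) true = w0 :: t := by
      cases hs : PySem.List.sorted works (fun x => x) true with
      | nil => exact absurd ((PySem.List.sorted_eq_nil_iff works (fun x => x) true).mp hs) hwne
      | cons a b => exact ⟨a, b, rfl⟩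
    rw [hws]
    dsimp only
    have hsort : sortedD (w0 :: t) := by
      have := PySem.List.sorted_pairwise_rev works (fun x => x)
      rw [hws] at this
      simpa [sortedD] using this
    rw [solGo_eq ((buildRuns (w0 :: t)).length * 2 + 1) (buildRuns (w0 :: t)) n w0 0
      (by split <;> omega) (by omega) (le_refl 0)
      (buildRuns_pairwise _ hsort)
      (buildRuns_cnt_pos _)
      (fun p hp => sortedD_head_le hsort p.1 (buildRuns_val_mem _ p hp))
      (by intro h0; exact absurd h0 (by omega))]
    rw [show (0 : Int).toNat = 0 from rfl]
    simp only [List.replicate_zero, List.nil_append]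
    rw [buildRuns_expand]
    rw [solution_eq_msG n works, hws]
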